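-- pv_equiv track=rewrite | github.com/pcjdhhhh/TILB | tool.py | generate_parameters
-- ===== SOURCE A (Python) =====
-- import math
--
-- def generate_parameters(dim):
--
--     max_ = math.floor(dim/2)
--     res = list()
--     first = 2
--     while True:
--         if first<=max_:
--             res.append(first)
--             first = first * 2
--         else:
--             break
--     return res
-- ===== SOURCE B (Python) =====
-- def generate_parameters(dim):
--     max_ = dim // 2  # == math.floor(dim/2) for ints
--     if max_ < 2:
--         return []
--     n = max_.bit_length()  # 2**(n-1) <= max_ < 2**n
--     return [1 << i for i in range(1, n)]
-- ===== Notes on version B (the rewrite author's own statement) =====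
-- stated objective: idiomatic
-- what changed: Replaces the accumulate-and-double while-loop with a closed form: derive the largest exponent from max_.bit_length() and emit the powers directly with a range comprehension.
import Mathlib
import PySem

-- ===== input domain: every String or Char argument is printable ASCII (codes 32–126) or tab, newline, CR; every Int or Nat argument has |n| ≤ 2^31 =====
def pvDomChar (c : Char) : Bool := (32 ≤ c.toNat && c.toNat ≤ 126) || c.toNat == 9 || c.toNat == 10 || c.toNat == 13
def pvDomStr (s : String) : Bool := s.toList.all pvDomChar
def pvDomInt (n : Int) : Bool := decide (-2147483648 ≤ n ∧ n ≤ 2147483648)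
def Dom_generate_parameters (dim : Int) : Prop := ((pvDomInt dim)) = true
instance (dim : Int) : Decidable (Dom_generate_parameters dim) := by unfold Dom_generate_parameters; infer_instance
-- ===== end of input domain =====

-- B replaces A's accumulate-and-double while-loop by a closed-form exponent count (bit_length) and a range comprehension.

-- ===== PORT A =====
-- while True: if first<=max_: append; first*=2 else break   (hf keeps 'first' positive for termination)
def pvLoopA (max_ : Int) (first : Int) (hf : 0 < first) (res : List Int) : List Int :=
  if first ≤ max_ then
    pvLoopA max_ (first * 2) (by positivity) (res ++ [first])
  else
    res
termination_by (max_ + 1 - first).toNat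
decreasing_by omega

-- math.floor(dim/2) on an int is exactly floor division by 2 (exact on Dom: no float rounding at |dim| ≤ 2^31)
def generate_parameters (dim : Int) : List Int :=
  pvLoopA (PySem.Int.floordiv dim 2) 2 (by norm_num) []

-- ===== PORT B =====
def generate_parameters_alt (dim : Int) : List Int :=
  let max_ : Int := PySem.Int.floordiv dim 2
  if max_ < 2 then []
  else
    -- n = max_.bit_length(); for max_ ≥ 1 this is log2 + 1
    let n : Int := (max_.toNat.log2 : Int) + 1
    (PySem.List.pyRange 1 n 1).map (fun i => (2 : Int) ^ i.toNat)

-- ===== PRECONDITION & SPEC =====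
def Spec_generate_parameters (dim : Int) (out : List Int) : Prop := out = generate_parameters_alt dim
instance (dim : Int) (out : List Int) : Decidable (Spec_generate_parameters dim out) := by unfold Spec_generate_parameters; infer_instance

-- ===== CLAIM (what is proved, stated in full; the proofs are below) =====
def Claim_equal_generate_parameters : Prop := ∀ (dim : Int), Dom_generate_parameters dim → Spec_generate_parameters dim (generate_parameters dim)

-- ===== LEMMAS AND PROOFS =====

theorem pvLoopA_congr (m a b : Int) (h1 : 0 < a) (h2 : 0 < b) (res : List Int) (hab : a = b) :
    pvLoopA m a h1 res = pvLoopA m b h2 res := by subst hab; rfl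

theorem pvLoopA_eq_range' (m : Int) (hm : 2 ≤ m) :
    ∀ (d k : Nat) (h : 0 < (2:Int)^k) (res : List Int),
      m.toNat.log2 + 1 - k = d →
      pvLoopA m ((2:Int)^k) h res = res ++ (List.range' k d).map (fun i => (2:Int)^i) := by
  intro d
  induction d with
  | zero =>
    intro k h res hd
    have hlt : m.toNat < 2 ^ k := by
      calc m.toNat < 2 ^ (m.toNat.log2 + 1) := Nat.lt_log2_self
        _ ≤ 2 ^ k := Nat.pow_le_pow_right (by norm_num) (by omega)
    have hm' : m < (2:Int) ^ k := by
      have : ((m.toNat : Int)) < ((2:Int))^k := by exact_mod_cast hlt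
      omega
    rw [pvLoopA]
    simp [not_le.mpr hm']
  | succ d ih =>
    intro k h res hd
    have hmn : m.toNat ≠ 0 := by omega
    have hk : k ≤ m.toNat.log2 := by omega
    have hle : (2:Int) ^ k ≤ m := by
      have h1 : 2 ^ k ≤ m.toNat := by
        calc 2 ^ k ≤ 2 ^ m.toNat.log2 := Nat.pow_le_pow_right (by norm_num) hk
          _ ≤ m.toNat := Nat.log2_self_le hmn
      have : ((2:Int))^k ≤ (m.toNat : Int) := by exact_mod_cast h1
      omega
    rw [pvLoopA]
    simp only [hle, if_pos]
    have hpow : (2:Int) ^ k * 2 = (2:Int) ^ (k + 1) := by ring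
    rw [pvLoopA_congr m ((2:Int)^k * 2) ((2:Int)^(k+1)) (by positivity) (by positivity) (res ++ [2 ^ k]) hpow]
    rw [ih (k+1) (by positivity) (res ++ [2 ^ k]) (by omega)]
    rw [List.range'_succ]
    simp

theorem generate_parameters_spec : Claim_equal_generate_parameters := by
  intro dim _
  unfold Spec_generate_parameters generate_parameters generate_parameters_alt
  set m := PySem.Int.floordiv dim 2 with hm
  by_cases h2 : m < 2
  · rw [pvLoopA]
    simp [not_le.mpr h2, h2]
  · rw [not_lt] at h2
    simp only [if_neg (not_lt.mpr h2)]
    have key := pvLoopA_eq_range' m h2 m.toNat.log2 1 (by norm_num) [] (by omega)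
    norm_num at key
    rw [key, PySem.List.pyRange_one]
    have hlen : (((m.toNat.log2 : Int) + 1) - 1).toNat = m.toNat.log2 := by omega
    rw [hlen, List.range'_eq_map_range]
    simp only [List.map_map]
    refine List.map_congr_left ?_
    intro j _
    simp only [Function.comp_apply]
    have : ((1 : Int) + (j : Int)).toNat = 1 + j := by omega
    rw [this]
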